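-- pv_equiv track=rewrite | github.com/aobp/CodeReview | lite_cpg/analysis/slicer.py | _bfs
-- ===== SOURCE A (Python) =====
-- from collections import deque
-- from typing import Iterable, List, Set
--
-- def _bfs(graph, starts: Iterable[str], limit: int) -> List[str]:
--     out: List[str] = []
--     q = deque()
--     seen: Set[str] = set()
--     for s in starts:
--         q.append(s)
--         seen.add(s)
--     while q and len(out) < limit:
--         cur = q.popleft()
--         out.append(cur)
--         for nxt in graph.get(cur, []):
--             if nxt in seen:
--                 continue
--             seen.add(nxt)
--             q.append(nxt)
--     return out
-- ===== SOURCE B (Python) =====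
-- def _bfs(graph, starts, limit):
--     out = []
--     frontier = list(starts)
--     seen = set(starts)
--     while frontier and len(out) < limit:
--         out.extend(frontier)
--         if len(out) > limit:
--             del out[limit:]
--             break
--         next_frontier = []
--         for cur in frontier:
--             for nxt in graph.get(cur, []):
--                 if nxt not in seen:
--                     seen.add(nxt)
--                     next_frontier.append(nxt)
--         frontier = next_frontier
--     return out
-- ===== Notes on version B (the rewrite author's own statement) =====
-- stated objective: alternative
-- what changed: Replaces A's node-at-a-time deque BFS with a level-synchronous BFS: the whole frontier is appended to the output at once (truncated mid-level to limit) and the next frontier is built per level, so no queue is maintained.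
import Mathlib
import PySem

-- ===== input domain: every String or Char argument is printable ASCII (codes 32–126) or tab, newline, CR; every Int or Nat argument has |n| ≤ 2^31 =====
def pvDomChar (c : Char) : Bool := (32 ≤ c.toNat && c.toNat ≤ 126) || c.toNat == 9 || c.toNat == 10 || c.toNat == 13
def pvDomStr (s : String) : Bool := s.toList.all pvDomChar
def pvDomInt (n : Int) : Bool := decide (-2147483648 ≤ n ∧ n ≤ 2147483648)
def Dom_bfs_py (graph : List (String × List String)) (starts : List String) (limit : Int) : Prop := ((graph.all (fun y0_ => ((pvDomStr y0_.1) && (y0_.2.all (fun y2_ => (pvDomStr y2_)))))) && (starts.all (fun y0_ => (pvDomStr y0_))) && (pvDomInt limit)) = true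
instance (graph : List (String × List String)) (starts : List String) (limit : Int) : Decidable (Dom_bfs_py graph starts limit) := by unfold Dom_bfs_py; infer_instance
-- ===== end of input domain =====

-- B re-implements A's deque-based BFS as a level-synchronous (frontier-at-a-time) BFS with
-- mid-level truncation to `limit`; objective: alternative decomposition, same exact output.

-- ===== PORT A =====
-- A's inner `for nxt in graph.get(cur, []): if nxt in seen: continue; seen.add(nxt); q.append(nxt)`
def bfsA_enq (acc : List String × PySem.Set String) (nxt : String) : List String × PySem.Set String :=
  if PySem.Set.contains acc.2 nxt then acc else (acc.1 ++ [nxt], PySem.Set.add acc.2 nxt)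

-- A's `while q and len(out) < limit` loop; the fuel argument only makes the loop total
-- (it is chosen ≥ the number of possible pops, so it never runs out).
def bfsA_loop (graph : List (String × List String)) (limit : Int) :
    Nat → List String → PySem.Set String → List String → List String
  | 0, _, _, out => out
  | _ + 1, [], _, out => out
  | n + 1, cur :: qrest, seen, out =>
    if (out.length : Int) < limit then
      let st := (PySem.Dict.getD ⟨graph⟩ cur []).foldl bfsA_enq (qrest, seen)
      bfsA_loop graph limit n st.1 st.2 (out ++ [cur])
    else out

def bfs_py (graph : List (String × List String)) (starts : List String) (limit : Int) : List String :=
  -- `for s in starts: q.append(s); seen.add(s)`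
  let init := starts.foldl
    (fun (qs : List String × PySem.Set String) s => (qs.1 ++ [s], PySem.Set.add qs.2 s))
    ([], PySem.Set.empty)
  bfsA_loop graph limit (starts.length + (graph.map (fun p => p.2.length)).sum + 1) init.1 init.2 []

-- ===== PORT B =====
-- B's inner `if nxt not in seen: seen.add(nxt); next_frontier.append(nxt)`
def bfsB_enq (acc : List String × PySem.Set String) (nxt : String) : List String × PySem.Set String :=
  if PySem.Set.contains acc.2 nxt then acc else (acc.1 ++ [nxt], PySem.Set.add acc.2 nxt)

-- one whole level: collect the not-yet-seen neighbors of the frontier, in order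
def bfsB_level (graph : List (String × List String)) (frontier : List String)
    (seen : PySem.Set String) : List String × PySem.Set String :=
  frontier.foldl (fun acc cur => (PySem.Dict.getD ⟨graph⟩ cur []).foldl bfsB_enq acc) ([], seen)

-- B's `while frontier and len(out) < limit` loop (fuel ≥ number of levels; never runs out).
-- `del out[limit:]` is `take limit.toNat`: exact here since that branch needs 0 ≤ len(out) < limit.
def bfsB_loop (graph : List (String × List String)) (limit : Int) :
    Nat → List String → PySem.Set String → List String → List String
  | 0, _, _, out => out
  | _ + 1, [], _, out => out
  | n + 1, cur :: rest, seen, out =>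
    if (out.length : Int) < limit then
      let out' := out ++ (cur :: rest)
      if limit < (out'.length : Int) then out'.take limit.toNat
      else
        let st := bfsB_level graph (cur :: rest) seen
        bfsB_loop graph limit n st.1 st.2 out'
    else out

def bfs_py_alt (graph : List (String × List String)) (starts : List String) (limit : Int) : List String :=
  bfsB_loop graph limit (starts.length + (graph.map (fun p => p.2.length)).sum + 1)
    starts (PySem.Set.ofList starts) []

-- ===== PRECONDITION & SPEC =====
def Spec_bfs_py (graph : List (String × List String)) (starts : List String) (limit : Int) (out : List String) : Prop := out = bfs_py_alt graph starts limit
instance (graph : List (String × List String)) (starts : List String) (limit : Int) (out : List String) : Decidable (Spec_bfs_py graph starts limit out) := by unfold Spec_bfs_py; infer_instance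

-- ===== CLAIM (what is proved, stated in full; the proofs are below) =====
def Claim_equal_bfs_py : Prop := ∀ (graph : List (String × List String)) (starts : List String) (limit : Int), Dom_bfs_py graph starts limit → Spec_bfs_py graph starts limit (bfs_py graph starts limit)

-- ===== LEMMAS AND PROOFS =====

-- all neighbor occurrences in the graph
def pvAllNbrs (graph : List (String × List String)) : List String := (graph.map Prod.snd).flatten

-- potential: number of distinct neighbors not yet seen (bounds both pops and levels remaining)
def pvPot (graph : List (String × List String)) (s : PySem.Set String) : Nat :=
  ((pvAllNbrs graph).toFinset \ s.toFinset).card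

theorem bfsA_loop_nil (g : List (String × List String)) (l : Int) (n : Nat)
    (s : PySem.Set String) (o : List String) : bfsA_loop g l n [] s o = o := by
  cases n <;> rfl

theorem bfsB_loop_nil (g : List (String × List String)) (l : Int) (n : Nat)
    (s : PySem.Set String) (o : List String) : bfsB_loop g l n [] s o = o := by
  cases n <;> rfl

theorem bfsA_loop_stop (g : List (String × List String)) (l : Int) (n : Nat)
    (q : List String) (s : PySem.Set String) (o : List String) (h : l ≤ (o.length : Int)) :
    bfsA_loop g l n q s o = o := by
  cases n with
  | zero => rfl
  | succ n =>
    cases q with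
    | nil => rfl
    | cons c r => simp only [bfsA_loop]; rw [if_neg (by omega)]

theorem bfsB_loop_stop (g : List (String × List String)) (l : Int) (n : Nat)
    (q : List String) (s : PySem.Set String) (o : List String) (h : l ≤ (o.length : Int)) :
    bfsB_loop g l n q s o = o := by
  cases n with
  | zero => rfl
  | succ n =>
    cases q with
    | nil => rfl
    | cons c r => simp only [bfsB_loop]; rw [if_neg (by omega)]

-- shifting the already-queued part out of the inner neighbor fold
theorem innerA_shift (nbrs q : List String) (s : PySem.Set String) :
    nbrs.foldl bfsA_enq (q, s) =
      (q ++ (nbrs.foldl bfsA_enq ([], s)).1, (nbrs.foldl bfsA_enq ([], s)).2) := by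
  induction nbrs generalizing q s with
  | nil => simp
  | cons x rest ih =>
    simp only [List.foldl_cons, bfsA_enq]
    by_cases h : PySem.Set.contains s x
    · simp only [h, if_pos]; exact ih q s
    · simp only [h, if_neg, Bool.false_eq_true, not_false_iff]
      rw [ih (q ++ [x])]
      simp only [List.nil_append]
      rw [ih [x]]
      simp [List.append_assoc]

theorem innerB_shift (nbrs q : List String) (s : PySem.Set String) :
    nbrs.foldl bfsB_enq (q, s) =
      (q ++ (nbrs.foldl bfsB_enq ([], s)).1, (nbrs.foldl bfsB_enq ([], s)).2) :=
  innerA_shift nbrs q s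

-- same shift for the outer (level) fold
theorem levelB_shift (g : List (String × List String)) (f : List String) :
    ∀ (q : List String) (s : PySem.Set String),
    f.foldl (fun acc cur => (PySem.Dict.getD ⟨g⟩ cur []).foldl bfsB_enq acc) (q, s) =
      (q ++ (bfsB_level g f s).1, (bfsB_level g f s).2) := by
  induction f with
  | nil => intro q s; simp [bfsB_level]
  | cons c rest ih =>
    intro q s
    simp only [bfsB_level, List.foldl_cons]
    rw [innerB_shift (PySem.Dict.getD ⟨g⟩ c []) q s,
        innerB_shift (PySem.Dict.getD ⟨g⟩ c []) [] s]
    rw [ih, ih]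
    simp [List.append_assoc]

theorem level_cons (g : List (String × List String)) (c : String) (f : List String)
    (s : PySem.Set String) :
    bfsB_level g (c :: f) s =
      (((PySem.Dict.getD ⟨g⟩ c []).foldl bfsB_enq ([], s)).1 ++
        (bfsB_level g f ((PySem.Dict.getD ⟨g⟩ c []).foldl bfsB_enq ([], s)).2).1,
       (bfsB_level g f ((PySem.Dict.getD ⟨g⟩ c []).foldl bfsB_enq ([], s)).2).2) := by
  conv_lhs => simp only [bfsB_level, List.foldl_cons]
  rw [innerB_shift (PySem.Dict.getD ⟨g⟩ c []) [] s]
  rw [levelB_shift g f]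

-- every value looked up in the graph is among its neighbor occurrences
theorem getD_sub (g : List (String × List String)) (cur x : String)
    (hx : x ∈ PySem.Dict.getD ⟨g⟩ cur []) : x ∈ pvAllNbrs g := by
  induction g with
  | nil => simp [PySem.Dict.getD, PySem.Dict.get?] at hx
  | cons p rest ih =>
    obtain ⟨k, v⟩ := p
    simp only [PySem.Dict.getD, PySem.Dict.get?_mk_cons] at hx ih
    simp only [pvAllNbrs, List.map_cons, List.flatten_cons, List.mem_append]
    by_cases h : (k == cur)
    · rw [if_pos h] at hx; left; simpa using hx
    · rw [if_neg h] at hx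
      right
      simpa [pvAllNbrs] using ih hx

theorem pot_add (g : List (String × List String)) (s : PySem.Set String) (x : String)
    (hx : x ∈ pvAllNbrs g) (hc : ¬ PySem.Set.contains s x) :
    pvPot g (PySem.Set.add s x) + 1 = pvPot g s := by
  have hns : x ∉ s := by
    intro hm
    exact hc (by simpa [PySem.Set.contains] using hm)
  have hadd : PySem.Set.add s x = s ++ [x] := by
    simp only [PySem.Set.add]
    rw [if_neg (by simpa [PySem.Set.contains] using hc)]
  have hmem : x ∈ (pvAllNbrs g).toFinset \ (s : List String).toFinset := by
    simp [Finset.mem_sdiff, List.mem_toFinset, hx, hns]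
  have hpos : 0 < ((pvAllNbrs g).toFinset \ (s : List String).toFinset).card :=
    Finset.card_pos.mpr ⟨x, hmem⟩
  have htf : (PySem.Set.add s x : List String).toFinset =
      insert x (s : List String).toFinset := by
    rw [hadd]
    simp [List.toFinset_append, Finset.union_singleton]
  unfold pvPot
  rw [htf, Finset.sdiff_insert, Finset.card_erase_of_mem hmem]
  omega

theorem pot_inner (g : List (String × List String)) (nbrs q : List String) (s : PySem.Set String)
    (hsub : ∀ x ∈ nbrs, x ∈ pvAllNbrs g) :
    (nbrs.foldl bfsA_enq (q, s)).1.length + pvPot g (nbrs.foldl bfsA_enq (q, s)).2 ≤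
      q.length + pvPot g s := by
  induction nbrs generalizing q s with
  | nil => simp
  | cons x rest ih =>
    simp only [List.foldl_cons, bfsA_enq]
    by_cases h : PySem.Set.contains s x
    · simp only [h, if_pos]
      exact ih q s (fun y hy => hsub y (List.mem_cons_of_mem _ hy))
    · simp only [h, if_neg, Bool.false_eq_true, not_false_iff]
      have h1 := ih (q ++ [x]) (PySem.Set.add s x) (fun y hy => hsub y (List.mem_cons_of_mem _ hy))
      have h2 := pot_add g s x (hsub x (List.mem_cons_self)) h
      simp only [List.length_append, List.length_cons, List.length_nil] at h1 ⊢
      omega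

theorem pot_level_aux (g : List (String × List String)) (f : List String) :
    ∀ (q : List String) (s : PySem.Set String),
    (f.foldl (fun acc cur => (PySem.Dict.getD ⟨g⟩ cur []).foldl bfsB_enq acc) (q, s)).1.length +
      pvPot g (f.foldl (fun acc cur => (PySem.Dict.getD ⟨g⟩ cur []).foldl bfsB_enq acc) (q, s)).2 ≤
      q.length + pvPot g s := by
  induction f with
  | nil => intro q s; simp
  | cons c rest ih =>
    intro q s
    simp only [List.foldl_cons]
    have hin := pot_inner g (PySem.Dict.getD ⟨g⟩ c []) q s (fun y hy => getD_sub g c y hy)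
    have hih := ih ((PySem.Dict.getD ⟨g⟩ c []).foldl bfsB_enq (q, s)).1
      ((PySem.Dict.getD ⟨g⟩ c []).foldl bfsB_enq (q, s)).2
    exact le_trans hih hin

theorem pot_level (g : List (String × List String)) (f : List String) (s : PySem.Set String) :
    (bfsB_level g f s).1.length + pvPot g (bfsB_level g f s).2 ≤ pvPot g s := by
  have := pot_level_aux g f [] s
  simpa [bfsB_level] using this

-- A processes a whole level exactly as B does, fuel bookkeeping included
theorem bfsA_level (g : List (String × List String)) (l : Int) (f : List String) :
    ∀ (q : List String) (s : PySem.Set String) (o : List String) (n : Nat),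
    (o.length : Int) < l →
    bfsA_loop g l (n + f.length) (f ++ q) s o =
      if ((o.length : Int) + f.length ≤ l)
      then bfsA_loop g l n (q ++ (bfsB_level g f s).1) (bfsB_level g f s).2 (o ++ f)
      else (o ++ f).take l.toNat := by
  induction f with
  | nil =>
    intro q s o n ho
    rw [if_pos (by simpa using le_of_lt ho)]
    simp [bfsB_level]
  | cons c rest ih =>
    intro q s o n ho
    rw [show n + (c :: rest).length = (n + rest.length) + 1 from rfl]
    simp only [List.cons_append, bfsA_loop]
    rw [if_pos ho]
    rw [show ((PySem.Dict.getD ⟨g⟩ c []).foldl bfsA_enq (rest ++ q, s)) =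
      ((PySem.Dict.getD ⟨g⟩ c []).foldl bfsB_enq (rest ++ q, s)) from rfl]
    rw [innerB_shift (PySem.Dict.getD ⟨g⟩ c []) (rest ++ q) s]
    simp only [List.append_assoc]
    by_cases h1 : ((o ++ [c]).length : Int) < l
    · rw [ih (q ++ ((PySem.Dict.getD ⟨g⟩ c []).foldl bfsB_enq ([], s)).1)
          ((PySem.Dict.getD ⟨g⟩ c []).foldl bfsB_enq ([], s)).2 (o ++ [c]) n h1]
      rw [level_cons]
      simp only [List.length_append, List.length_cons, List.length_nil] at h1 ⊢
      by_cases h2 : (o.length : Int) + ((c :: rest).length : Int) ≤ l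
      · rw [if_pos (by push_cast [List.length_cons] at h2 ⊢; omega),
            if_pos (by push_cast [List.length_cons] at h2 ⊢; omega)]
        simp [List.append_assoc]
      · rw [if_neg (by push_cast [List.length_cons] at h2 ⊢; omega),
            if_neg (by push_cast [List.length_cons] at h2 ⊢; omega)]
        simp [List.append_assoc]
    · -- out reached exactly the limit with this pop
      have hl : l = (o.length : Int) + 1 := by
        simp only [List.length_append, List.length_cons, List.length_nil] at h1
        push_cast at h1 ⊢
        omega
      rw [bfsA_loop_stop g l _ _ _ _ (by simp [hl])]
      cases rest with
      | nil =>
        rw [if_pos (by simp [hl])]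
        rw [bfsA_loop_stop g l _ _ _ _ (by simp [hl])]
      | cons d rest' =>
        rw [if_neg (by simp only [List.length_cons]; push_cast; omega)]
        have hln : l.toNat = (o ++ [c]).length := by simp; omega
        rw [show o ++ c :: d :: rest' = (o ++ [c]) ++ (d :: rest') from by simp, hln,
           List.take_left]

theorem bfsB_step (g : List (String × List String)) (l : Int) (f : List String)
    (s : PySem.Set String) (o : List String) (m : Nat) (ho : (o.length : Int) < l) :
    bfsB_loop g l (m + 1) f s o =
      if ((o.length : Int) + f.length ≤ l)
      then bfsB_loop g l m (bfsB_level g f s).1 (bfsB_level g f s).2 (o ++ f)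
      else (o ++ f).take l.toNat := by
  cases f with
  | nil =>
    rw [if_pos (by simpa using le_of_lt ho)]
    simp [bfsB_level, bfsB_loop_nil]
  | cons c rest =>
    simp only [bfsB_loop]
    rw [if_pos ho]
    by_cases h : (o.length : Int) + ((c :: rest).length : Int) ≤ l
    · rw [if_neg (by simp only [List.length_append, List.length_cons] at *; push_cast at *; omega),
          if_pos (by omega)]
    · rw [if_pos (by simp only [List.length_append, List.length_cons] at *; push_cast at *; omega),
          if_neg (by omega)]

theorem bfsAB (g : List (String × List String)) (l : Int) :
    ∀ (m n : Nat) (f : List String) (s : PySem.Set String) (o : List String),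
    (o.length : Int) < l → f.length + pvPot g s ≤ n → pvPot g s < m →
    bfsA_loop g l n f s o = bfsB_loop g l m f s o := by
  intro m
  induction m with
  | zero => intro n f s o _ _ hm; omega
  | succ m ih =>
    intro n f s o ho hn hm
    cases f with
    | nil => rw [bfsA_loop_nil, bfsB_loop_nil]
    | cons c rest =>
      obtain ⟨n', rfl⟩ : ∃ n', n = n' + (c :: rest).length :=
        ⟨n - (c :: rest).length, by simp only [List.length_cons] at hn ⊢; omega⟩
      have hA := bfsA_level g l (c :: rest) [] s o n' ho
      rw [List.append_nil] at hA
      rw [hA, bfsB_step g l (c :: rest) s o m ho]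
      by_cases hc : (o.length : Int) + ((c :: rest).length : Int) ≤ l
      · rw [if_pos hc, if_pos hc]
        simp only [List.nil_append]
        by_cases ho' : (((o ++ c :: rest).length : Nat) : Int) < l
        · cases hL : (bfsB_level g (c :: rest) s).1 with
          | nil =>
            rw [bfsA_loop_nil, bfsB_loop_nil]
          | cons a b =>
            have hp := pot_level g (c :: rest) s
            rw [hL] at hp
            apply ih n' _ _ _ ho'
            · simp only [List.length_cons] at hn hp ⊢
              omega
            · simp only [List.length_cons] at hp
              omega
        · have hstop : l ≤ (((o ++ c :: rest).length : Nat) : Int) := by omega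
          rw [bfsA_loop_stop g l _ _ _ _ hstop, bfsB_loop_stop g l _ _ _ _ hstop]
      · rw [if_neg hc, if_neg hc]

theorem init_fold (starts q0 : List String) (s0 : PySem.Set String) :
    starts.foldl (fun (qs : List String × PySem.Set String) s => (qs.1 ++ [s], PySem.Set.add qs.2 s)) (q0, s0) =
      (q0 ++ starts, starts.foldl PySem.Set.add s0) := by
  induction starts generalizing q0 s0 with
  | nil => simp
  | cons x rest ih => simp [ih]

theorem pot_le (g : List (String × List String)) (s : PySem.Set String) :
    pvPot g s ≤ (g.map (fun p => p.2.length)).sum := by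
  calc pvPot g s ≤ (pvAllNbrs g).toFinset.card :=
        Finset.card_le_card (Finset.sdiff_subset)
    _ ≤ (pvAllNbrs g).length := List.toFinset_card_le _
    _ = (g.map (fun p => p.2.length)).sum := by
        simp [pvAllNbrs, List.length_flatten, List.map_map, Function.comp_def]

-- ===== VERDICT (by name: the statement is the Claim_ definition above) =====
theorem bfs_py_spec : Claim_equal_bfs_py := by
  intro g st l _
  unfold Spec_bfs_py bfs_py bfs_py_alt
  simp only [init_fold, List.nil_append]
  rw [show (List.foldl PySem.Set.add PySem.Set.empty st) = PySem.Set.ofList st from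
    (PySem.Set.ofList_eq_foldl st).symm]
  by_cases hl : 0 < l
  · exact bfsAB g l _ _ st (PySem.Set.ofList st) []
      (by simpa using hl)
      (by have := pot_le g (PySem.Set.ofList st); omega)
      (by have := pot_le g (PySem.Set.ofList st); omega)
  · rw [bfsA_loop_stop g l _ _ _ _ (by simp; omega),
        bfsB_loop_stop g l _ _ _ _ (by simp; omega)]
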